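-- pv_equiv track=rewrite | github.com/piercewilliams/ops-hub | scripts/enrich_tracker.py | find_url_column
-- ===== SOURCE A (Python) =====
-- def find_url_column(headers):
--     """Return 0-based index of the Published URL/Link column."""
--     lower = [h.lower() for h in headers]
--     # Prefer a column explicitly labelled "published"
--     for i, h in enumerate(lower):
--         if "published" in h and ("url" in h or "link" in h):
--             return i
--     for i, h in enumerate(lower):
--         if "url" in h or "link" in h:
--             return i
--     raise ValueError(f"No URL/Link column found. Headers: {headers}")
-- ===== SOURCE B (Python) =====
-- def find_url_column(headers):
--     """Return 0-based index of the Published URL/Link column."""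
--     lower = [h.lower() for h in headers]
--     fallback = None
--     for i, h in enumerate(lower):
--         if "published" in h and ("url" in h or "link" in h):
--             return i
--         if fallback is None and ("url" in h or "link" in h):
--             fallback = i
--     if fallback is not None:
--         return fallback
--     raise ValueError(f"No URL/Link column found. Headers: {headers}")
-- ===== Notes on version B (the rewrite author's own statement) =====
-- stated objective: alternative
-- what changed: Replaces A's two sequential scans of the lowercased headers by a single pass that returns immediately on a 'published' URL/Link column and otherwise remembers the first plain URL/Link column as a fallback.
import Mathlib
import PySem

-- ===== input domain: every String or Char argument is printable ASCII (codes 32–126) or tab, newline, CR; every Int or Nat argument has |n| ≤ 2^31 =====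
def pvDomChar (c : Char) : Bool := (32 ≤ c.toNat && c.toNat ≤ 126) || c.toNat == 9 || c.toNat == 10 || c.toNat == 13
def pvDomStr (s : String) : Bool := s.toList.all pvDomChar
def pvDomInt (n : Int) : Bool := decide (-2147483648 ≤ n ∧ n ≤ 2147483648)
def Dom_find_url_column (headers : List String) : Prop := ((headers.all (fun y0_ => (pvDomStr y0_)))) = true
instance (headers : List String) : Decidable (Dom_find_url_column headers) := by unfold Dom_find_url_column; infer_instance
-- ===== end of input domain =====

-- B replaces A's two sequential scans by a single pass with a fallback index (alternative decomposition, same cost).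
-- Both Pythons raise ValueError when no header contains 'url' or 'link'; those inputs are outside Pre_.

-- boolean conditions exactly as written in both Pythons
def pvP1 (h : String) : Bool :=
  PySem.Str.isIn "published" h && (PySem.Str.isIn "url" h || PySem.Str.isIn "link" h)
def pvP2 (h : String) : Bool :=
  PySem.Str.isIn "url" h || PySem.Str.isIn "link" h

-- ===== PORT A =====
-- first loop: "published" in h and ("url" in h or "link" in h) → return i
def pvALoop1 (i : Int) (l : List String) : Option Int :=
  match l with
  | [] => none
  | h :: t =>
    if pvP1 h then some i else pvALoop1 (i + 1) t

-- second loop: "url" in h or "link" in h → return i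
def pvALoop2 (i : Int) (l : List String) : Option Int :=
  match l with
  | [] => none
  | h :: t =>
    if pvP2 h then some i else pvALoop2 (i + 1) t

def find_url_column (headers : List String) : Int :=
  let lower := headers.map PySem.Str.lower
  match pvALoop1 0 lower with
  | some i => i
  | none =>
    match pvALoop2 0 lower with
    | some i => i
    | none => -1    -- Python raises ValueError here; excluded by Pre_

-- ===== PORT B =====
-- single pass: return on a 'published' URL/Link column, else remember first URL/Link column
def pvBLoop (i : Int) (fallback : Option Int) (l : List String) : Int :=
  match l with
  | [] =>
    match fallback with
    | some f => f
    | none => -1    -- Python raises ValueError here; excluded by Pre_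
  | h :: t =>
    if pvP1 h then i
    else
      pvBLoop (i + 1)
        (if fallback.isNone && pvP2 h then some i else fallback) t

def find_url_column_alt (headers : List String) : Int :=
  pvBLoop 0 none (headers.map PySem.Str.lower)

-- ===== PRECONDITION & SPEC =====
-- Pre_ excludes exactly the inputs where the Python raises ValueError: no lowercased header contains "url" or "link".
def Pre_find_url_column (headers : List String) : Prop :=
  (headers.map PySem.Str.lower).any (fun h => PySem.Str.isIn "url" h || PySem.Str.isIn "link" h) = true
instance (headers : List String) : Decidable (Pre_find_url_column headers) := by
  unfold Pre_find_url_column; infer_instance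

def pvWitness_find_url_column : List String := ["Title", "Published URL"]

def Spec_find_url_column (headers : List String) (out : Int) : Prop := out = find_url_column_alt headers
instance (headers : List String) (out : Int) : Decidable (Spec_find_url_column headers out) := by unfold Spec_find_url_column; infer_instance

-- ===== CLAIM (what is proved, stated in full; the proofs are below) =====
def Claim_equal_find_url_column : Prop := ∀ (headers : List String), Dom_find_url_column headers → Pre_find_url_column headers → Spec_find_url_column headers (find_url_column headers)

-- ===== LEMMAS AND PROOFS =====

-- B's single pass equals A's two passes, with the fallback standing for a pending second-pass result.
theorem pvBLoop_eq (l : List String) : ∀ (i : Int) (fb : Option Int),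
    pvBLoop i fb l =
      match pvALoop1 i l with
      | some j => j
      | none =>
        match fb with
        | some f => f
        | none =>
          match pvALoop2 i l with
          | some j => j
          | none => -1 := by
  induction l with
  | nil => intro i fb; cases fb <;> rfl
  | cons h t ih =>
    intro i fb
    by_cases h1 : pvP1 h = true
    · simp only [pvBLoop, pvALoop1, if_pos h1]
    · by_cases h2 : pvP2 h = true
      · cases fb with
        | none =>
          simp only [pvBLoop, pvALoop1, pvALoop2, if_neg h1, if_pos h2, ih, Option.isNone_none,
            Bool.true_and]
        | some f =>
          simp only [pvBLoop, pvALoop1, if_neg h1, ih, Option.isNone_some, Bool.false_and,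
            Bool.false_eq_true, if_false]
      · cases fb with
        | none =>
          simp only [pvBLoop, pvALoop1, pvALoop2, if_neg h1, ih, Option.isNone_none,
            Bool.true_and, h2, Bool.false_eq_true, if_false]
        | some f =>
          simp only [pvBLoop, pvALoop1, if_neg h1, ih, Option.isNone_some, Bool.false_and,
            Bool.false_eq_true, if_false]

-- ===== VERDICT (by name: the statement is the Claim_ definition above) =====
theorem find_url_column_spec : Claim_equal_find_url_column := by
  intro headers _ _
  unfold Spec_find_url_column find_url_column find_url_column_alt
  rw [pvBLoop_eq]
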